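-- pv_equiv track=rewrite | github.com/alexandershov/learn | python/utf8.py | my_decode_utf8
-- ===== SOURCE A (Python) =====
-- DES = 0b110
--
-- TRES = 0b1110
--
-- QUATRO = 0b11110
--
-- INNER = 0b10
--
-- def my_decode_utf8(s):
--     chars = []
--     codepoint = 0
--     n = 0
--     for i, b in enumerate(s):
--         if n == 0:
--             if (b >> 3) == QUATRO:
--                 n = 3
--                 codepoint = 0b111 & b
--             elif (b >> 4) == TRES:
--                 n = 2
--                 codepoint = 0b111_1 & b
--             elif (b >> 5) == DES:
--                 n = 1
--                 codepoint = 0b111_11 & b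
--             elif b <= 127:
--                 codepoint = 0
--                 chars.append(chr(b))
--             else:
--                 raise ValueError(i)
--         else:
--             assert n > 0
--             assert (b >> 6) == INNER
--             codepoint = (codepoint << 6) + (b & 0b111_111)
--             n -= 1
--             if not n:
--                 chars.append(chr(codepoint))
--     return ''.join(chars)
-- ===== SOURCE B (Python) =====
-- DES = 0b110
--
-- TRES = 0b1110
--
-- QUATRO = 0b11110
--
-- INNER = 0b10
--
-- def my_decode_utf8(s):
--     out = []
--     i = 0
--     length = len(s)
--     while i < length:
--         b = s[i]
--         if b <= 127:
--             out.append(chr(b))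
--             i += 1
--             continue
--         if (b >> 3) == QUATRO:
--             need, codepoint = 3, b & 0b111
--         elif (b >> 4) == TRES:
--             need, codepoint = 2, b & 0b1111
--         elif (b >> 5) == DES:
--             need, codepoint = 1, b & 0b11111
--         else:
--             raise ValueError(i)
--         i += 1
--         taken = 0
--         while taken < need and i < length:
--             b = s[i]
--             assert (b >> 6) == INNER
--             codepoint = (codepoint << 6) + (b & 0b111111)
--             i += 1
--             taken += 1
--         if taken == need:
--             out.append(chr(codepoint))
--     return ''.join(out)
-- ===== Notes on version B (the rewrite author's own statement) =====
-- stated objective: alternative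
-- what changed: Replaces A's single enumerate-fold that threads (codepoint, remaining-continuation-count) state across iterations with an explicit-index outer while loop that dispatches on each lead byte and a nested inner while loop that consumes that character's continuation bytes.
import Mathlib
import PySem

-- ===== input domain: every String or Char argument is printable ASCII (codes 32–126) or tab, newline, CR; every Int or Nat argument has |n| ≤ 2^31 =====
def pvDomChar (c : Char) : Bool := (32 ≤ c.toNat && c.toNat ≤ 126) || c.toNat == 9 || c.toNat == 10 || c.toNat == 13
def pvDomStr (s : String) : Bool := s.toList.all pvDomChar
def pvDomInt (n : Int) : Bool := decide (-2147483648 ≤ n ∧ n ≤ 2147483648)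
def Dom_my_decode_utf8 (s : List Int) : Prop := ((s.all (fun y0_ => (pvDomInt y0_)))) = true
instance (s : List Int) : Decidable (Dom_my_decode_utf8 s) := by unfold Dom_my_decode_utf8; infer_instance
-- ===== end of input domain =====

-- B replaces A's single enumerate-fold carrying (codepoint, n) state with an explicit-index
-- outer loop and a nested continuation-consuming inner loop (objective: alternative decomposition, same O(n) cost).

-- ===== PORT A =====
-- chr(x): exact for Unicode scalar values, which Pre_ guarantees
def pyChr (b : Int) : Char := Char.ofNat b.toNat

-- one step of A's for-loop over the bytes; state none = an exception was raised
-- (the enumerate index i is used by Python only as the ValueError payload, which 'none' absorbs)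
def stepA (st : Option (List Char × Int × Int)) (b : Int) : Option (List Char × Int × Int) :=
  match st with
  | none => none
  | some (chars, codepoint, n) =>
    if n = 0 then
      if b >>> (3:Nat) = 30 then some (chars, PySem.Int.band 7 b, 3)
      else if b >>> (4:Nat) = 14 then some (chars, PySem.Int.band 15 b, 2)
      else if b >>> (5:Nat) = 6 then some (chars, PySem.Int.band 31 b, 1)
      else if b ≤ 127 then some (chars ++ [pyChr b], 0, 0)
      else none                       -- raise ValueError(i)
    else
      if b >>> (6:Nat) = 2 then
        let cp := (codepoint <<< (6:Nat)) + PySem.Int.band b 63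
        if n - 1 = 0 then some (chars ++ [pyChr cp], cp, 0)
        else some (chars, cp, n - 1)
      else none                       -- assert (b >> 6) == INNER fails

def my_decode_utf8 (s : List Int) : String :=
  match s.foldl stepA (some ([], 0, 0)) with
  | some (chars, _, _) => String.ofList chars   -- ''.join(chars)
  | none => ""                              -- unreachable under Pre_ (Python raises here)

-- ===== PORT B =====
-- inner while loop: consume `need` continuation bytes, returning the codepoint and the rest;
-- none = the loop stopped early (input exhausted, or the assert fired — the latter is outside Pre_)
def consumeB : Nat → Int → List Int → Option (Int × List Int)
  | 0, cp, rest => some (cp, rest)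
  | _ + 1, _, [] => none
  | k + 1, cp, b :: r =>
    if b >>> (6:Nat) = 2 then consumeB k ((cp <<< (6:Nat)) + PySem.Int.band b 63) r
    else none

theorem consumeB_le : ∀ {k : Nat} {cp : Int} {rest : List Int} {cp' : Int} {rest' : List Int},
    consumeB k cp rest = some (cp', rest') → rest'.length ≤ rest.length := by
  intro k
  induction k with
  | zero => intro cp rest cp' rest' h; simp [consumeB] at h; simp [h]
  | succ k ih =>
    intro cp rest cp' rest' h
    match rest with
    | [] => simp [consumeB] at h
    | b :: r =>
      simp only [consumeB] at h
      split at h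
      · exact Nat.le_trans (ih h) (by simp)
      · exact absurd h (by simp)

-- lead-byte dispatch of B's outer loop (need, seed codepoint); none = raise ValueError(i)
def leadOf (b : Int) : Option (Nat × Int) :=
  if b >>> (3:Nat) = 30 then some (3, PySem.Int.band b 7)
  else if b >>> (4:Nat) = 14 then some (2, PySem.Int.band b 15)
  else if b >>> (5:Nat) = 6 then some (1, PySem.Int.band b 31)
  else none

-- outer while loop over the remaining bytes
def altLoop (s : List Int) : List Char :=
  match s with
  | [] => []
  | b :: rest =>
    if b ≤ 127 then pyChr b :: altLoop rest
    else
      match leadOf b with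
      | some (k, cp) =>
        match _h : consumeB k cp rest with
        | some (cp', rest') => pyChr cp' :: altLoop rest'
        | none => []                  -- taken < need: input exhausted, loop ends silently
      | none => []                    -- raise ValueError(i); unreachable under Pre_
termination_by s.length
decreasing_by
  · simp
  · have := consumeB_le _h; simp; omega

def my_decode_utf8_alt (s : List Int) : String := String.ofList (altLoop s)

-- ===== PRECONDITION & SPEC =====
def validScalar (cp : Int) : Bool := cp ≤ 0x10FFFF && !(0xD800 ≤ cp && cp ≤ 0xDFFF)

-- grammar of byte lists A decodes without raising and whose result is a Lean-representable String:
-- ASCII bytes and 2/3/4-byte sequences (a trailing truncated sequence is allowed — A drops it silently),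
-- each completed codepoint a Unicode scalar value
-- structural recursion over the byte list; k = continuation bytes still owed to the current
-- character (0 = between characters), cp = its partially decoded codepoint
def validAux : Nat → Int → List Int → Bool
  | _, _, [] => true
  | 0, _, b :: rest =>
    if 0 ≤ b ∧ b ≤ 127 then validAux 0 0 rest
    else if b >>> (3:Nat) = 30 then validAux 3 (PySem.Int.band 7 b) rest
    else if b >>> (4:Nat) = 14 then validAux 2 (PySem.Int.band 15 b) rest
    else if b >>> (5:Nat) = 6 then validAux 1 (PySem.Int.band 31 b) rest
    else false
  | k + 1, cp, b :: rest =>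
    if b >>> (6:Nat) = 2 then
      let cp' := (cp <<< (6:Nat)) + PySem.Int.band b 63
      if k = 0 then validScalar cp' && validAux 0 0 rest
      else validAux k cp' rest
    else false

def validSeq (s : List Int) : Bool := validAux 0 0 s

-- Pre_ excludes inputs where A raises (invalid lead byte → ValueError, bad continuation byte →
-- AssertionError, negative byte or codepoint > 0x10FFFF → chr's ValueError) and the sequences whose
-- decoded result contains a lone surrogate code point, which A returns but is not a value of type String.
def Pre_my_decode_utf8 (s : List Int) : Prop := validSeq s = true
instance (s : List Int) : Decidable (Pre_my_decode_utf8 s) := by unfold Pre_my_decode_utf8; infer_instance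

def pvWitness_my_decode_utf8 : List Int := [104, 105, 33, 196, 169, 226, 130, 172, 240, 159, 152, 128]

def Spec_my_decode_utf8 (s : List Int) (out : String) : Prop := out = my_decode_utf8_alt s
instance (s : List Int) (out : String) : Decidable (Spec_my_decode_utf8 s out) := by unfold Spec_my_decode_utf8; infer_instance

-- ===== CLAIM (what is proved, stated in full; the proofs are below) =====
def Claim_equal_my_decode_utf8 : Prop := ∀ (s : List Int), Dom_my_decode_utf8 s → Pre_my_decode_utf8 s → Spec_my_decode_utf8 s (my_decode_utf8 s)

-- ===== LEMMAS AND PROOFS =====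

-- proof-side view of validAux mid-character: k bytes still owed, cp the partial codepoint
def validCont (k : Nat) (cp : Int) (rest : List Int) : Bool :=
  match k with
  | 0 => validScalar cp && validSeq rest
  | k + 1 => validAux (k + 1) cp rest

theorem validSeq_cons (b : Int) (rest : List Int) :
    validSeq (b :: rest)
      = (if 0 ≤ b ∧ b ≤ 127 then validSeq rest
         else if b >>> (3:Nat) = 30 then validCont 3 (PySem.Int.band 7 b) rest
         else if b >>> (4:Nat) = 14 then validCont 2 (PySem.Int.band 15 b) rest
         else if b >>> (5:Nat) = 6 then validCont 1 (PySem.Int.band 31 b) rest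
         else false) := rfl

theorem validCont_zero (cp : Int) (rest : List Int) :
    validCont 0 cp rest = (validScalar cp && validSeq rest) := rfl

theorem validCont_succ_cons (k : Nat) (cp b : Int) (r : List Int) :
    validCont (k + 1) cp (b :: r)
      = (if b >>> (6:Nat) = 2 then validCont k ((cp <<< (6:Nat)) + PySem.Int.band b 63) r
         else false) := by cases k <;> rfl

-- A's fold runs through the continuation bytes of one character exactly like B's inner loop
theorem fold_conts : ∀ (k : Nat) (cp : Int) (rest : List Int) (chars : List Char),
    validCont (k + 1) cp rest = true →
    (match consumeB (k + 1) cp rest with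
     | some (cp', rest') =>
        List.foldl stepA (some (chars, cp, ((k : Int) + 1))) rest
          = List.foldl stepA (some (chars ++ [pyChr cp'], cp', 0)) rest'
     | none => ∃ cp'' n'', n'' ≠ 0 ∧
        List.foldl stepA (some (chars, cp, ((k : Int) + 1))) rest = some (chars, cp'', n'')) := by
  intro k
  induction k with
  | zero =>
    intro cp rest chars h
    match rest with
    | [] => exact ⟨cp, 1, by norm_num, rfl⟩
    | b :: r =>
      rw [validCont_succ_cons] at h
      split at h
      case isTrue hb =>
        simp only [consumeB, if_pos hb]
        simp only [List.foldl, stepA, if_pos hb]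
        simp at h ⊢
      case isFalse hb => simp at h
  | succ j ih =>
    intro cp rest chars h
    match rest with
    | [] => exact ⟨cp, (j:Int) + 1 + 1, by omega, rfl⟩
    | b :: r =>
      rw [validCont_succ_cons] at h
      split at h
      case isTrue hb =>
        simp only [consumeB, if_pos hb]
        simp only [List.foldl, stepA, Nat.cast_add, Nat.cast_one,
          if_neg (by omega : ¬((j:Int) + 1 + 1 = 0)), if_pos hb,
          if_neg (by omega : ¬((j:Int) + 1 + 1 - 1 = 0))]
        have heq1 : ((j:Int) + 1 + 1 - 1) = (j:Int) + 1 := by omega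
        rw [heq1]
        have := ih ((cp <<< (6:Nat)) + PySem.Int.band b 63) r chars h
        revert this
        cases hcon : consumeB (j + 1) ((cp <<< (6:Nat)) + PySem.Int.band b 63) r with
        | some p => intro this; exact this
        | none =>
          intro this
          obtain ⟨cp'', n'', hn, heq⟩ := this
          exact ⟨cp'', n'', hn, heq⟩
      case isFalse hb => simp at h

-- validity and length facts carried across a successful inner loop
theorem consumeB_valid : ∀ (k : Nat) (cp : Int) (rest : List Int) (cp' : Int) (rest' : List Int),
    validCont k cp rest = true → consumeB k cp rest = some (cp', rest') →
    validSeq rest' = true := by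
  intro k
  induction k with
  | zero =>
    intro cp rest cp' rest' hv hc
    simp only [consumeB, Option.some.injEq, Prod.mk.injEq] at hc
    simp only [validCont_zero, Bool.and_eq_true] at hv
    rw [← hc.2]; exact hv.2
  | succ j ih =>
    intro cp rest cp' rest' hv hc
    match rest with
    | [] => simp [consumeB] at hc
    | b :: r =>
      rw [validCont_succ_cons] at hv
      simp only [consumeB] at hc
      split at hv
      case isTrue hb =>
        rw [if_pos hb] at hc
        exact ih _ _ _ _ hv hc
      case isFalse hb => simp at hv

-- small-byte / lead-byte arithmetic facts about Python's >> used by the branch analyses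
theorem ascii_no_lead (b : Int) (h0 : 0 ≤ b) (h1 : b ≤ 127) :
    b >>> (3:Nat) ≠ 30 ∧ b >>> (4:Nat) ≠ 14 ∧ b >>> (5:Nat) ≠ 6 := by
  rw [Int.shiftRight_eq_div_pow, Int.shiftRight_eq_div_pow, Int.shiftRight_eq_div_pow]
  refine ⟨by omega, by omega, by omega⟩

theorem lead4_gt (b : Int) (h : b >>> (3:Nat) = 30) : ¬ b ≤ 127 := by
  rw [Int.shiftRight_eq_div_pow] at h; omega

theorem lead3_gt (b : Int) (h : b >>> (4:Nat) = 14) : ¬ b ≤ 127 := by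
  rw [Int.shiftRight_eq_div_pow] at h; omega

theorem lead2_gt (b : Int) (h : b >>> (5:Nat) = 6) : ¬ b ≤ 127 := by
  rw [Int.shiftRight_eq_div_pow] at h; omega

-- a lead byte accepted by leadOf: what validSeq guarantees and how A's first step reads it
theorem lead_analysis (b : Int) (rest : List Int) (k : Nat) (cp0 : Int)
    (hlead : leadOf b = some (k, cp0)) (hv : validSeq (b :: rest) = true) (hgt : ¬ b ≤ 127) :
    1 ≤ k ∧ validCont k cp0 rest = true ∧
    ∀ (chars : List Char) (cp : Int),
      List.foldl stepA (some (chars, cp, 0)) (b :: rest)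
        = List.foldl stepA (some (chars, cp0, (k : Int))) rest := by
  rw [validSeq_cons, if_neg (fun hab => hgt hab.2)] at hv
  by_cases h3 : b >>> (3:Nat) = 30
  · have hk : k = 3 ∧ cp0 = PySem.Int.band b 7 := by simpa [leadOf, h3] using hlead.symm
    obtain ⟨rfl, rfl⟩ := hk
    rw [if_pos h3, PySem.Int.band_comm 7 b] at hv
    refine ⟨by omega, hv, fun chars cp => ?_⟩
    simp [stepA, h3, PySem.Int.band_comm 7 b]
  · rw [if_neg h3] at hv
    by_cases h4 : b >>> (4:Nat) = 14
    · have hk : k = 2 ∧ cp0 = PySem.Int.band b 15 := by simpa [leadOf, h3, h4] using hlead.symm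
      obtain ⟨rfl, rfl⟩ := hk
      rw [if_pos h4, PySem.Int.band_comm 15 b] at hv
      refine ⟨by omega, hv, fun chars cp => ?_⟩
      simp [stepA, h3, h4, PySem.Int.band_comm 15 b]
    · rw [if_neg h4] at hv
      by_cases h5 : b >>> (5:Nat) = 6
      · have hk : k = 1 ∧ cp0 = PySem.Int.band b 31 := by simpa [leadOf, h3, h4, h5] using hlead.symm
        obtain ⟨rfl, rfl⟩ := hk
        rw [if_pos h5, PySem.Int.band_comm 31 b] at hv
        refine ⟨by omega, hv, fun chars cp => ?_⟩
        simp [stepA, h3, h4, h5, PySem.Int.band_comm 31 b]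
      · rw [if_neg h5] at hv; simp at hv

-- one unfolding of B's outer loop at a non-ASCII lead byte
theorem altLoop_lead (b : Int) (rest : List Int) (k : Nat) (cp0 : Int)
    (hgt : ¬ b ≤ 127) (hlead : leadOf b = some (k, cp0)) :
    altLoop (b :: rest) = (match consumeB k cp0 rest with
      | some (cp', rest') => pyChr cp' :: altLoop rest'
      | none => []) := by
  rw [altLoop, if_neg hgt, hlead]
  split <;> simp_all
  split <;> simp_all

-- main invariant: on a valid suffix, A's fold appends exactly B's characters
theorem fold_main : ∀ (s : List Int) (chars : List Char) (cp : Int),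
    validSeq s = true →
    ∃ cp' n', List.foldl stepA (some (chars, cp, 0)) s = some (chars ++ altLoop s, cp', n') := by
  intro s
  induction s using altLoop.induct with
  | case1 =>
    intro chars cp _hv
    exact ⟨cp, 0, by simp [altLoop]⟩
  | case2 b rest hble ih =>
    intro chars cp hv
    rw [validSeq_cons] at hv
    split at hv
    case isTrue hab =>
      obtain ⟨hs3, hs4, hs5⟩ := ascii_no_lead b hab.1 hab.2
      have hstep : List.foldl stepA (some (chars, cp, 0)) (b :: rest)
          = List.foldl stepA (some (chars ++ [pyChr b], 0, 0)) rest := by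
        simp [stepA, hs3, hs4, hs5, hble]
      obtain ⟨cp', n', h⟩ := ih (chars ++ [pyChr b]) 0 hv
      exact ⟨cp', n', by rw [hstep, h]; simp [altLoop, hble]⟩
    case isFalse =>
      split at hv
      case isTrue h3 => exact absurd hble (lead4_gt b h3)
      case isFalse =>
        split at hv
        case isTrue h4 => exact absurd hble (lead3_gt b h4)
        case isFalse =>
          split at hv
          case isTrue h5 => exact absurd hble (lead2_gt b h5)
          case isFalse => simp at hv
  | case3 b rest hbgt k cp0 hlead cp' rest' hcon ih =>
    intro chars cp hv
    obtain ⟨hk1, hvc, hstep⟩ := lead_analysis b rest k cp0 hlead hv hbgt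
    obtain ⟨j, rfl⟩ : ∃ j, k = j + 1 := ⟨k - 1, by omega⟩
    have hmain := fold_conts j cp0 rest chars hvc
    rw [hcon] at hmain
    have hcast : ((j + 1 : Nat) : Int) = (j : Int) + 1 := by push_cast; ring
    have hv' : validSeq rest' = true := consumeB_valid (j + 1) cp0 rest cp' rest' hvc hcon
    obtain ⟨c2, n2, h2⟩ := ih (chars ++ [pyChr cp']) cp' hv'
    refine ⟨c2, n2, ?_⟩
    rw [hstep chars cp, hcast, hmain, h2, altLoop_lead b rest (j + 1) cp0 hbgt hlead, hcon]
    simp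
  | case4 b rest hbgt k cp0 hlead hcon =>
    intro chars cp hv
    obtain ⟨hk1, hvc, hstep⟩ := lead_analysis b rest k cp0 hlead hv hbgt
    obtain ⟨j, rfl⟩ : ∃ j, k = j + 1 := ⟨k - 1, by omega⟩
    have hmain := fold_conts j cp0 rest chars hvc
    rw [hcon] at hmain
    obtain ⟨cp'', n'', hn, heq⟩ := hmain
    have hcast : ((j + 1 : Nat) : Int) = (j : Int) + 1 := by push_cast; ring
    refine ⟨cp'', n'', ?_⟩
    rw [hstep chars cp, hcast, heq, altLoop_lead b rest (j + 1) cp0 hbgt hlead, hcon]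
    simp
  | case5 b rest hbgt hlead =>
    intro chars cp hv
    rw [validSeq_cons, if_neg (fun hab => hbgt hab.2)] at hv
    by_cases h3 : b >>> (3:Nat) = 30
    · simp [leadOf, h3] at hlead
    · by_cases h4 : b >>> (4:Nat) = 14
      · simp [leadOf, h3, h4] at hlead
      · by_cases h5 : b >>> (5:Nat) = 6
        · simp [leadOf, h3, h4, h5] at hlead
        · rw [if_neg h3, if_neg h4, if_neg h5] at hv; simp at hv

-- ===== VERDICT (by name: the statement is the Claim_ definition above) =====
theorem my_decode_utf8_spec : Claim_equal_my_decode_utf8 := by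
  intro s _hdom hpre
  unfold Spec_my_decode_utf8 my_decode_utf8 my_decode_utf8_alt
  obtain ⟨cp', n', h⟩ := fold_main s [] 0 hpre
  simp [h]
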